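-- pv_equiv track=rewrite | github.com/veljkozivkovic/elfakIV | AI/Labovi/3LabVI.py | zad9
-- ===== SOURCE A (Python) =====
-- from queue import Queue
--
-- def zad9(graph: dict[str, list[str]], start: str, n: int) -> int:
--     visited = set()
--     queue = Queue(len(graph))
--     distances = {start: 0}
--     visited.add(start)
--     queue.put(start)
--     result = 0
--
--     nodes =[]
--
--     while not queue.empty():
--         node = queue.get()
--         prev = distances[node]
--         if prev == n:
--             result += 1
--             nodes.append(node)
--         elif prev > n:
--             continue
--         for neighbour in graph[node]:
--             if neighbour not in visited:
--                 visited.add(neighbour)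
--                 queue.put(neighbour)
--                 distances[neighbour] = prev + 1
--     return result, nodes
-- ===== SOURCE B (Python) =====
-- def zad9(graph: dict[str, list[str]], start: str, n: int) -> int:
--     # Level-synchronous BFS: walk the graph one whole level at a time,
--     # no Queue and no distances dict.
--     if n < 0:
--         return 0, []
--     frontier = [start]
--     visited = {start}
--     level = 0
--     while frontier:
--         if level == n:
--             return len(frontier), list(frontier)
--         next_frontier = []
--         for node in frontier:
--             for neighbour in graph[node]:
--                 if neighbour not in visited:
--                     visited.add(neighbour)
--                     next_frontier.append(neighbour)
--         frontier = next_frontier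
--         level += 1
--     return 0, []
-- ===== Notes on version B (the rewrite author's own statement) =====
-- stated objective: idiomatic
-- what changed: Replaced the Queue-plus-distances-dict BFS by a level-synchronous BFS that keeps only the current frontier list and a visited set, counting the frontier when it reaches level n; same O(V+E) cost, no Queue and no distances dict.
-- outside the precondition, e.g. on zad9({'a': ['b']}, 'a', 0): A returns (1, ['a']), B returns (1, ['a']); on zad9({'a': ['b', 'c']}, 'a', 0): A does not finish within the time limit, B returns (1, ['a']); on zad9({'a': ['b']}, 'a', 1): A raises KeyError, B returns (1, ['b'])
import Mathlib
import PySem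

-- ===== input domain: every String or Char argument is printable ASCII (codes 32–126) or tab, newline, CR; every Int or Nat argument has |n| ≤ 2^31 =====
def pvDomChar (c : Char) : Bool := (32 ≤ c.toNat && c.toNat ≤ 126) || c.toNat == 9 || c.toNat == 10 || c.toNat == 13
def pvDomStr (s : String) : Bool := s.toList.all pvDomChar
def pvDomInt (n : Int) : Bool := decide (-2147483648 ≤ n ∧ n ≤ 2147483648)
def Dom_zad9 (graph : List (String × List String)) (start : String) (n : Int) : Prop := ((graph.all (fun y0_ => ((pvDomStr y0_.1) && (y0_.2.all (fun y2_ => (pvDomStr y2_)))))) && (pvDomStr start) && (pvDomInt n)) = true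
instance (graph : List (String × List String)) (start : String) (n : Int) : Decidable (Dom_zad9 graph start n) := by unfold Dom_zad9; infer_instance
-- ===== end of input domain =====

-- B replaces A's Queue + distances-dict BFS by a level-synchronous BFS (frontier list + visited set),
-- same cost, more idiomatic; equivalence is about the return value (A mutates nothing observable).

-- ===== PORT A =====
-- the inner `for neighbour in graph[node]` loop of A (graph[node] raising KeyError is excluded by Pre_)
def aexpand (g : PySem.Dict String (List String)) (prev : Int) (node : String)
    (vis : PySem.Set String) (q : List String) (dist : PySem.Dict String Int) :
    PySem.Set String × List String × PySem.Dict String Int :=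
  ((g.get? node).getD []).foldl
    (fun st y => if st.1.contains y then st
                 else (PySem.Set.add st.1 y, st.2.1 ++ [y], st.2.2.insert y (prev + 1)))
    (vis, q, dist)

-- the `while not queue.empty()` loop; fuel only makes it total (it exceeds the number of
-- dequeues on every input satisfying Pre_, proved below)
def aloop (g : PySem.Dict String (List String)) (n : Int) :
    Nat → List String → PySem.Set String → PySem.Dict String Int → Int → List String →
    Int × List String
  | 0, _, _, _, res, nodes => (res, nodes)
  | _ + 1, [], _, _, res, nodes => (res, nodes)
  | fuel + 1, node :: q, vis, dist, res, nodes =>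
    let prev := (dist.get? node).getD 0
    if prev = n then
      let st := aexpand g prev node vis q dist
      aloop g n fuel st.2.1 st.1 st.2.2 (res + 1) (nodes ++ [node])
    else if prev > n then
      aloop g n fuel q vis dist res nodes
    else
      let st := aexpand g prev node vis q dist
      aloop g n fuel st.2.1 st.1 st.2.2 res nodes

def zad9 (graph : List (String × List String)) (start : String) (n : Int) : Int × List String :=
  let g := PySem.Dict.ofList graph
  aloop g n (graph.length + 1) [start] (PySem.Set.add PySem.Set.empty start)
    ((PySem.Dict.empty).insert start 0) 0 []

-- ===== PORT B =====
-- one unvisited-neighbour append step of B's inner loop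
def bstep (st : PySem.Set String × List String) (y : String) : PySem.Set String × List String :=
  if st.1.contains y then st else (PySem.Set.add st.1 y, st.2 ++ [y])

-- `for node in frontier: for neighbour in graph[node]: …` building next_frontier
def blevel (g : PySem.Dict String (List String)) (st : PySem.Set String × List String)
    (node : String) : PySem.Set String × List String :=
  ((g.get? node).getD []).foldl bstep st

-- the `while frontier:` loop, counting down the remaining levels n - level
def bloop (g : PySem.Dict String (List String)) :
    Nat → List String → PySem.Set String → Int × List String
  | _, [], _ => (0, [])
  | 0, frontier, _ => ((frontier.length : Int), frontier)
  | k + 1, frontier, vis =>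
    let st := frontier.foldl (blevel g) (vis, [])
    bloop g k st.2 st.1

def zad9_alt (graph : List (String × List String)) (start : String) (n : Int) : Int × List String :=
  if n < 0 then (0, [])
  else bloop (PySem.Dict.ofList graph) n.toNat [start] (PySem.Set.ofList [start])

-- ===== PRECONDITION & SPEC =====
-- Pre_ excludes n ≥ 0 inputs whose graph is not a closed adjacency map (start a key, every
-- neighbour a key): there A can raise KeyError (graph[node]) or block forever on its bounded
-- Queue(len(graph)); on the excluded inputs where A still returns, B returns the same value.
def Pre_zad9 (graph : List (String × List String)) (start : String) (n : Int) : Prop :=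
  n < 0 ∨ (start ∈ graph.map (·.1) ∧ ∀ p ∈ graph, ∀ v ∈ p.2, v ∈ graph.map (·.1))
instance (graph : List (String × List String)) (start : String) (n : Int) : Decidable (Pre_zad9 graph start n) := by unfold Pre_zad9; infer_instance

def pvWitness_zad9 : (List (String × List String)) × String × Int :=
  ([("a", ["b"]), ("b", [])], "a", 1)

def Spec_zad9 (graph : List (String × List String)) (start : String) (n : Int) (out : Int × List String) : Prop := out = zad9_alt graph start n
instance (graph : List (String × List String)) (start : String) (n : Int) (out : Int × List String) : Decidable (Spec_zad9 graph start n out) := by unfold Spec_zad9; infer_instance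

-- ===== CLAIM (what is proved, stated in full; the proofs are below) =====
def Claim_equal_zad9 : Prop := ∀ (graph : List (String × List String)) (start : String) (n : Int), Dom_zad9 graph start n → Pre_zad9 graph start n → Spec_zad9 graph start n (zad9 graph start n)



-- ===== LEMMAS AND PROOFS =====

-- neighbours of x as both ports read them (graph[node], [] standing for the excluded KeyError)
def nbD (g : PySem.Dict String (List String)) (x : String) : List String :=
  (g.get? x).getD []

-- number of keys of g not yet visited (the fuel potential)
def unvis (g : PySem.Dict String (List String)) (vis : PySem.Set String) : Nat :=
  (g.keys.filter (fun k => !vis.contains k)).length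

lemma aloop_nil (g : PySem.Dict String (List String)) (n : Int) (fuel : Nat)
    (vis : PySem.Set String) (dist : PySem.Dict String Int) (res : Int) (nodes : List String) :
    aloop g n fuel [] vis dist res nodes = (res, nodes) := by
  cases fuel <;> simp [aloop]

lemma filter_len_lt {L : List String} {p q : String → Bool}
    (himp : ∀ x, q x = true → p x = true) {y : String}
    (hy : y ∈ L) (hpy : p y = true) (hqy : q y = false) :
    (L.filter q).length < (L.filter p).length := by
  induction L with
  | nil => cases hy
  | cons a t ih =>
    have hmono : (t.filter q).length ≤ (t.filter p).length := by
      simp only [← List.countP_eq_length_filter]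
      exact List.countP_mono_left (fun x _ hx => himp x hx)
    rcases List.mem_cons.mp hy with rfl | hmem
    · simpa [List.filter_cons, hpy, hqy] using Nat.lt_succ_of_le hmono
    · have h := ih hmem
      cases hqa : q a
      · cases hpa : p a <;> simp [hqa, hpa] <;> omega
      · have hpa := himp a hqa
        simpa [List.filter_cons, hqa, hpa] using Nat.succ_lt_succ h

lemma unvis_add_lt (g : PySem.Dict String (List String)) (vis : PySem.Set String) (y : String)
    (hk : y ∈ g.keys) (hv : vis.contains y = false) :
    unvis g (PySem.Set.add vis y) < unvis g vis := by
  refine filter_len_lt ?_ hk ?_ ?_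
  · intro x hx
    simp only [Bool.not_eq_true'] at hx ⊢
    cases hvx : vis.contains x
    · rfl
    · exfalso
      have hm : x ∈ PySem.Set.add vis y :=
        (PySem.Set.mem_add _ _ _).mpr (Or.inl ((PySem.Set.contains_iff _ _).mp hvx))
      rw [(PySem.Set.contains_iff _ _).mpr hm] at hx
      exact Bool.noConfusion hx
  · simp only [hv, Bool.not_false]
  · have hc : (PySem.Set.add vis y).contains y = true :=
      (PySem.Set.contains_iff _ _).mpr ((PySem.Set.mem_add _ _ _).mpr (Or.inr rfl))
    simp only [hc, Bool.not_true]

-- the inner `for neighbour in graph[node]` loop of A and of B do the same thing to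
-- (visited, tail of the queue / next_frontier); A additionally records distance prev+1
lemma expand_fold (g : PySem.Dict String (List String)) (prev : Int) :
    ∀ (ns : List String), (∀ y ∈ ns, y ∈ g.keys) →
    ∀ (vis : PySem.Set String) (acc rest' : List String) (dist : PySem.Dict String Int),
    (∀ x ∈ acc, vis.contains x = true) →
    ∃ dist' : PySem.Dict String Int,
      ns.foldl (fun st y => if st.1.contains y then st
          else (PySem.Set.add st.1 y, st.2.1 ++ [y], st.2.2.insert y (prev + 1)))
        (vis, rest' ++ acc, dist)
        = ((ns.foldl bstep (vis, acc)).1, rest' ++ (ns.foldl bstep (vis, acc)).2, dist')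
      ∧ (∀ x, vis.contains x = true → dist'.get? x = dist.get? x)
      ∧ (∀ x ∈ (ns.foldl bstep (vis, acc)).2, x ∈ acc ∨ (dist'.get? x = some (prev + 1) ∧ x ∈ g.keys))
      ∧ (∀ x, vis.contains x = true → (ns.foldl bstep (vis, acc)).1.contains x = true)
      ∧ (∀ x ∈ (ns.foldl bstep (vis, acc)).2, (ns.foldl bstep (vis, acc)).1.contains x = true)
      ∧ unvis g (ns.foldl bstep (vis, acc)).1 + (ns.foldl bstep (vis, acc)).2.length
          ≤ unvis g vis + acc.length := by
  intro ns
  induction ns with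
  | nil =>
    intro _ vis acc rest' dist hacc
    exact ⟨dist, rfl, fun x _ => rfl, fun x hx => Or.inl hx, fun x hx => hx, hacc, le_refl _⟩
  | cons y t ih =>
    intro hns vis acc rest' dist hacc
    have hkeys : y ∈ g.keys := hns y (List.mem_cons_self ..)
    have ht : ∀ z ∈ t, z ∈ g.keys := fun z hz => hns z (List.mem_cons_of_mem _ hz)
    by_cases hyv : y ∈ vis
    · have hy : vis.contains y = true := (PySem.Set.contains_iff _ _).mpr hyv
      have := ih ht vis acc rest' dist hacc
      simpa [List.foldl_cons, bstep, hy, hyv] using this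
    · have hy : vis.contains y = false := by
        cases hc : vis.contains y
        · rfl
        · exact absurd ((PySem.Set.contains_iff _ _).mp hc) hyv
      have hacc1 : ∀ x ∈ acc ++ [y], (PySem.Set.add vis y).contains x = true := by
        intro x hx
        rw [PySem.Set.contains_iff, PySem.Set.mem_add]
        rcases List.mem_append.mp hx with hx | hx
        · exact Or.inl ((PySem.Set.contains_iff _ _).mp (hacc x hx))
        · exact Or.inr (List.mem_singleton.mp hx)
      obtain ⟨dist', h1, h2, h3, h4, h5, h6⟩ :=
        ih ht (PySem.Set.add vis y) (acc ++ [y]) rest' (dist.insert y (prev + 1)) hacc1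
      have hstep : ∀ x, vis.contains x = true → (PySem.Set.add vis y).contains x = true := by
        intro x hx
        rw [PySem.Set.contains_iff, PySem.Set.mem_add]
        exact Or.inl ((PySem.Set.contains_iff _ _).mp hx)
      refine ⟨dist', ?_, ?_, ?_, ?_, ?_, ?_⟩
      · simpa [List.foldl_cons, bstep, hy, hyv, List.append_assoc] using h1
      · intro x hx
        have hne : x ≠ y := by rintro rfl; rw [hx] at hy; cases hy
        rw [h2 x (hstep x hx), PySem.Dict.get?_insert_of_ne dist (prev + 1) hne]
      · intro x hx
        simp only [List.foldl_cons, bstep, hy] at hx ⊢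
        rcases h3 x hx with hmem | hrest
        · rcases List.mem_append.mp hmem with hmem | hmem
          · exact Or.inl hmem
          · rcases List.mem_singleton.mp hmem with rfl
            refine Or.inr ⟨?_, hkeys⟩
            have hcy : (PySem.Set.add vis x).contains x = true := by
              rw [PySem.Set.contains_iff, PySem.Set.mem_add]; exact Or.inr rfl
            rw [h2 x hcy, PySem.Dict.get?_insert_self]
        · exact Or.inr hrest
      · intro x hx
        simp only [List.foldl_cons, bstep, hy]
        exact h4 x (hstep x hx)
      · intro x hx
        simp only [List.foldl_cons, bstep, hy] at hx ⊢
        exact h5 x hx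
      · have hlt := unvis_add_lt g vis y hkeys hy
        simp only [List.foldl_cons, bstep, hy]
        calc unvis g ((t.foldl bstep (PySem.Set.add vis y, acc ++ [y])).1)
              + (t.foldl bstep (PySem.Set.add vis y, acc ++ [y])).2.length
            ≤ unvis g (PySem.Set.add vis y) + (acc ++ [y]).length := h6
          _ ≤ unvis g vis + acc.length := by simp; omega

-- the expansion A performs while dequeuing a node, restated through aexpand / blevel
lemma aexpand_eq (g : PySem.Dict String (List String)) (prev : Int) (node : String)
    (vis : PySem.Set String) (acc rest' : List String) (dist : PySem.Dict String Int)
    (hns : ∀ y ∈ nbD g node, y ∈ g.keys) (hacc : ∀ x ∈ acc, vis.contains x = true) :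
    ∃ dist' : PySem.Dict String Int,
      aexpand g prev node vis (rest' ++ acc) dist
        = ((blevel g (vis, acc) node).1, rest' ++ (blevel g (vis, acc) node).2, dist')
      ∧ (∀ x, vis.contains x = true → dist'.get? x = dist.get? x)
      ∧ (∀ x ∈ (blevel g (vis, acc) node).2, x ∈ acc ∨ (dist'.get? x = some (prev + 1) ∧ x ∈ g.keys))
      ∧ (∀ x, vis.contains x = true → (blevel g (vis, acc) node).1.contains x = true)
      ∧ (∀ x ∈ (blevel g (vis, acc) node).2, (blevel g (vis, acc) node).1.contains x = true)
      ∧ unvis g (blevel g (vis, acc) node).1 + (blevel g (vis, acc) node).2.length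
          ≤ unvis g vis + acc.length := by
  have := expand_fold g prev (nbD g node) hns vis acc rest' dist hacc
  simpa [aexpand, blevel, nbD] using this

-- once every queued node is deeper than n, A only drains the queue
lemma skip_all (g : PySem.Dict String (List String)) (n : Int) :
    ∀ (q : List String) (fuel : Nat) (vis : PySem.Set String) (dist : PySem.Dict String Int)
      (res : Int) (nodes : List String),
    (∀ x ∈ q, ∃ dx : Int, dist.get? x = some dx ∧ n < dx) →
    q.length ≤ fuel →
    aloop g n fuel q vis dist res nodes = (res, nodes) := by
  intro q
  induction q with
  | nil => intro fuel _ _ _ _ _ _; exact aloop_nil ..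
  | cons a t ih =>
    intro fuel vis dist res nodes hq hfuel
    obtain ⟨fuel, rfl⟩ : ∃ f, fuel = f + 1 := ⟨fuel - 1, by simp at hfuel; omega⟩
    obtain ⟨dx, hdx, hlt⟩ := hq a (List.mem_cons_self ..)
    have h1 : ¬ ((dist.get? a).getD 0 = n) := by rw [hdx]; simp; omega
    have h2 : (dist.get? a).getD 0 > n := by rw [hdx]; simpa using hlt
    simp only [aloop, h1, if_false, h2, if_true]
    exact ih fuel vis dist res nodes (fun x hx => hq x (List.mem_cons_of_mem _ hx))
      (by simp at hfuel; omega)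

-- processing the level at exactly distance n counts and records it, then drains level n+1
lemma count_level (g : PySem.Dict String (List String)) (n : Int)
    (hCl : ∀ x, ∀ y ∈ nbD g x, y ∈ g.keys) :
    ∀ (rest acc : List String) (vis : PySem.Set String) (dist : PySem.Dict String Int)
      (res : Int) (nodes : List String) (fuel : Nat),
    (∀ x ∈ rest, dist.get? x = some n) →
    (∀ x ∈ acc, dist.get? x = some (n + 1)) →
    (∀ x ∈ rest, vis.contains x = true) →
    (∀ x ∈ acc, vis.contains x = true) →
    rest.length + acc.length + unvis g vis ≤ fuel →
    aloop g n fuel (rest ++ acc) vis dist res nodes = (res + rest.length, nodes ++ rest) := by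
  intro rest
  induction rest with
  | nil =>
    intro acc vis dist res nodes fuel _ hacc _ _ hfuel
    rw [List.nil_append]
    rw [skip_all g n acc fuel vis dist res nodes
      (fun x hx => ⟨n + 1, hacc x hx, by omega⟩) (by simp at hfuel; omega)]
    simp
  | cons node rest ih =>
    intro acc vis dist res nodes fuel hrest hacc hvrest hvacc hfuel
    obtain ⟨fuel, rfl⟩ : ∃ f, fuel = f + 1 := ⟨fuel - 1, by simp at hfuel; omega⟩
    have hdn : dist.get? node = some n := hrest node (List.mem_cons_self ..)
    have hprev : (dist.get? node).getD 0 = n := by rw [hdn]; rfl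
    obtain ⟨dist', h1, h2, h3, h4, h5, h6⟩ :=
      aexpand_eq g n node vis acc rest dist (hCl node) hvacc
    simp only [aloop, List.cons_append]
    rw [hprev, if_pos rfl, h1]
    have hvrest' : ∀ x ∈ rest, vis.contains x = true :=
      fun x hx => hvrest x (List.mem_cons_of_mem _ hx)
    rw [ih (blevel g (vis, acc) node).2 (blevel g (vis, acc) node).1 dist' (res + 1)
      (nodes ++ [node]) fuel
      (fun x hx => by rw [h2 x (hvrest' x hx)]; exact hrest x (List.mem_cons_of_mem _ hx))
      (fun x hx => by
        rcases h3 x hx with hmem | ⟨hget, _⟩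
        · rw [h2 x (hvacc x hmem)]; exact hacc x hmem
        · exact hget)
      (fun x hx => h4 x (hvrest' x hx))
      h5
      (by simp at hfuel ⊢; omega)]
    simp only [Prod.mk.injEq]
    constructor
    · push_cast [List.length_cons]; ring
    · simp

-- processing a level strictly above distance n turns A's queue into B's next frontier
lemma build_level (g : PySem.Dict String (List String)) (n : Int)
    (hCl : ∀ x, ∀ y ∈ nbD g x, y ∈ g.keys) (d : Int) (hdn : d < n) :
    ∀ (rest acc : List String) (vis : PySem.Set String) (dist : PySem.Dict String Int)
      (res : Int) (nodes : List String) (fuel : Nat),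
    (∀ x ∈ rest, dist.get? x = some d) →
    (∀ x ∈ acc, dist.get? x = some (d + 1)) →
    (∀ x ∈ rest, vis.contains x = true) →
    (∀ x ∈ acc, vis.contains x = true) →
    rest.length + acc.length + unvis g vis ≤ fuel →
    ∃ (dist' : PySem.Dict String Int) (fuel' : Nat),
      aloop g n fuel (rest ++ acc) vis dist res nodes
        = aloop g n fuel' (rest.foldl (blevel g) (vis, acc)).2
            (rest.foldl (blevel g) (vis, acc)).1 dist' res nodes
      ∧ (∀ x ∈ (rest.foldl (blevel g) (vis, acc)).2, dist'.get? x = some (d + 1))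
      ∧ (∀ x ∈ (rest.foldl (blevel g) (vis, acc)).2,
          (rest.foldl (blevel g) (vis, acc)).1.contains x = true)
      ∧ (rest.foldl (blevel g) (vis, acc)).2.length
          + unvis g (rest.foldl (blevel g) (vis, acc)).1 ≤ fuel' := by
  intro rest
  induction rest with
  | nil =>
    intro acc vis dist res nodes fuel _ hacc _ hvacc hfuel
    exact ⟨dist, fuel, by simp, hacc, hvacc, by simp at hfuel ⊢; omega⟩
  | cons node rest ih =>
    intro acc vis dist res nodes fuel hrest hacc hvrest hvacc hfuel
    obtain ⟨fuel, rfl⟩ : ∃ f, fuel = f + 1 := ⟨fuel - 1, by simp at hfuel; omega⟩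
    have hdnode : dist.get? node = some d := hrest node (List.mem_cons_self ..)
    have hprev : (dist.get? node).getD 0 = d := by rw [hdnode]; rfl
    obtain ⟨dist₂, h1, h2, h3, h4, h5, h6⟩ :=
      aexpand_eq g d node vis acc rest dist (hCl node) hvacc
    simp only [aloop, List.cons_append]
    rw [hprev, if_neg (by omega : ¬ (d = n)), if_neg (by omega : ¬ (d > n)), h1]
    have hvrest' : ∀ x ∈ rest, vis.contains x = true :=
      fun x hx => hvrest x (List.mem_cons_of_mem _ hx)
    obtain ⟨dist', fuel', hh⟩ := ih (blevel g (vis, acc) node).2 (blevel g (vis, acc) node).1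
      dist₂ res nodes fuel
      (fun x hx => by rw [h2 x (hvrest' x hx)]; exact hrest x (List.mem_cons_of_mem _ hx))
      (fun x hx => by
        rcases h3 x hx with hmem | ⟨hget, _⟩
        · rw [h2 x (hvacc x hmem)]; exact hacc x hmem
        · exact hget)
      (fun x hx => h4 x (hvrest' x hx))
      h5
      (by simp at hfuel ⊢; omega)
    exact ⟨dist', fuel', by simpa [List.foldl_cons] using hh⟩

-- A's whole queue phase from a level boundary equals B's remaining level loop
lemma levels (g : PySem.Dict String (List String)) (n : Int)
    (hCl : ∀ x, ∀ y ∈ nbD g x, y ∈ g.keys) :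
    ∀ (k : Nat) (frontier : List String) (vis : PySem.Set String)
      (dist : PySem.Dict String Int) (res : Int) (nodes : List String) (fuel : Nat) (d : Int),
    d + k = n →
    (∀ x ∈ frontier, dist.get? x = some d) →
    (∀ x ∈ frontier, vis.contains x = true) →
    frontier.length + unvis g vis ≤ fuel →
    aloop g n fuel frontier vis dist res nodes
      = (res + (bloop g k frontier vis).1, nodes ++ (bloop g k frontier vis).2) := by
  intro k
  induction k with
  | zero =>
    intro frontier vis dist res nodes fuel d hd hdist hvis hfuel
    have hdn : d = n := by omega
    subst hdn
    cases frontier with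
    | nil => rw [aloop_nil]; simp [bloop]
    | cons a t =>
      have := count_level g d hCl (a :: t) [] vis dist res nodes fuel
        hdist (by simp) hvis (by simp) (by simp at hfuel ⊢; omega)
      rw [List.append_nil] at this
      rw [this]
      simp [bloop]
  | succ k ih =>
    intro frontier vis dist res nodes fuel d hd hdist hvis hfuel
    cases frontier with
    | nil => rw [aloop_nil]; simp [bloop]
    | cons a t =>
      have hdn : d < n := by omega
      obtain ⟨dist', fuel', h1, h2, h3, h4⟩ :=
        build_level g n hCl d hdn (a :: t) [] vis dist res nodes fuel
          hdist (by simp) hvis (by simp) (by simp at hfuel ⊢; omega)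
      rw [List.append_nil] at h1
      rw [h1]
      rw [ih ((a :: t).foldl (blevel g) (vis, [])).2 ((a :: t).foldl (blevel g) (vis, [])).1
        dist' res nodes fuel' (d + 1) (by omega) h2 h3 (by omega)]
      simp only [bloop]

-- membership of a looked-up value of Dict.ofList in the original pair list
lemma get?_foldl_insert_mem {l : List (String × List String)} :
    ∀ (d : PySem.Dict String (List String)) (k : String) (v : List String),
    (l.foldl (fun d p => d.insert p.1 p.2) d).get? k = some v → (k, v) ∈ l ∨ d.get? k = some v := by
  induction l with
  | nil => intro d k v h; exact Or.inr h
  | cons p t ih =>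
    intro d k v h
    rcases ih (d.insert p.1 p.2) k v h with hmem | hd
    · exact Or.inl (List.mem_cons_of_mem _ hmem)
    · by_cases hk : k = p.1
      · subst hk
        rw [PySem.Dict.get?_insert_self] at hd
        obtain rfl := Option.some.injEq .. ▸ hd
        exact Or.inl (by simp)
      · rw [PySem.Dict.get?_insert_of_ne d p.2 hk] at hd
        exact Or.inr hd

lemma get?_ofList_mem {l : List (String × List String)} {k : String} {v : List String}
    (h : (PySem.Dict.ofList l).get? k = some v) : (k, v) ∈ l := by
  rcases get?_foldl_insert_mem PySem.Dict.empty k v h with hmem | hd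
  · exact hmem
  · rw [PySem.Dict.get?_empty] at hd; cases hd

lemma keys_ofList_fst (l : List (String × List String)) :
    (PySem.Dict.ofList l).keys = PySem.Set.ofList (l.map (·.1)) :=
  PySem.Dict.keys_foldl_insert_key (l := l) (key := Prod.fst) (f := fun _ p => p.2)
    (d := PySem.Dict.empty)

lemma len_foldl_add : ∀ (xs : List String) (s : PySem.Set String),
    (xs.foldl PySem.Set.add s).length ≤ s.length + xs.length := by
  intro xs
  induction xs with
  | nil => intro s; simp
  | cons a t ih =>
    intro s
    have hadd : (PySem.Set.add s a).length ≤ s.length + 1 := by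
      simp only [PySem.Set.add]
      split <;> simp
    calc ((a :: t).foldl PySem.Set.add s).length
        = (t.foldl PySem.Set.add (PySem.Set.add s a)).length := rfl
      _ ≤ (PySem.Set.add s a).length + t.length := ih _
      _ ≤ s.length + 1 + t.length := by omega
      _ = s.length + (a :: t).length := by simp [List.length_cons]; omega

-- ===== VERDICT (by name: the statement is the Claim_ definition above) =====
theorem zad9_spec : Claim_equal_zad9 := by
  intro graph start n _ hPre
  unfold Spec_zad9 zad9 zad9_alt
  by_cases hn : n < 0
  · simp only [if_pos hn]
    have hprev : (((PySem.Dict.empty.insert start (0 : Int))).get? start).getD 0 = 0 := by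
      rw [PySem.Dict.get?_insert_self]; rfl
    simp only [aloop]
    rw [hprev, if_neg (by omega), if_pos (by omega)]
    exact aloop_nil ..
  · rcases hPre with h | ⟨hstart, hclosed⟩
    · omega
    rw [if_neg hn]
    have hkeys : ∀ y, y ∈ (PySem.Dict.ofList graph).keys ↔ y ∈ graph.map (·.1) := by
      intro y
      rw [keys_ofList_fst]
      exact PySem.Set.mem_ofList _ _
    have hCl : ∀ x, ∀ y ∈ nbD (PySem.Dict.ofList graph) x, y ∈ (PySem.Dict.ofList graph).keys := by
      intro x y hy
      unfold nbD at hy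
      cases hx : (PySem.Dict.ofList graph).get? x with
      | none => rw [hx] at hy; cases hy
      | some l =>
        rw [hx] at hy
        have hmem := get?_ofList_mem hx
        exact (hkeys y).mpr (hclosed (x, l) hmem y hy)
    have hfuel : [start].length + unvis (PySem.Dict.ofList graph)
        (PySem.Set.add PySem.Set.empty start) ≤ graph.length + 1 := by
      have h1 : unvis (PySem.Dict.ofList graph) (PySem.Set.add PySem.Set.empty start)
          ≤ (PySem.Dict.ofList graph).keys.length := List.length_filter_le _ _
      have h2 : (PySem.Dict.ofList graph).keys.length ≤ (graph.map (·.1)).length := by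
        rw [keys_ofList_fst]
        simpa using len_foldl_add (graph.map (·.1)) []
      simp only [List.length_singleton]
      rw [List.length_map] at h2
      omega
    rw [levels (PySem.Dict.ofList graph) n hCl n.toNat [start]
      (PySem.Set.add PySem.Set.empty start) (PySem.Dict.empty.insert start 0) 0 []
      (graph.length + 1) 0 (by omega)
      (by intro x hx; rw [List.mem_singleton.mp hx, PySem.Dict.get?_insert_self])
      (by intro x hx
          rw [List.mem_singleton.mp hx, PySem.Set.contains_iff]
          exact (PySem.Set.mem_add _ _ _).mpr (Or.inr rfl))
      hfuel]
    have hset : (PySem.Set.ofList [start] : PySem.Set String)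
        = PySem.Set.add PySem.Set.empty start := rfl
    rw [hset]
    simp
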